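-- pv_equiv track=rewrite | github.com/matt-bendel/CINE-FM | CardiacFM/scripts/train_fm_model_global.py | choose_grid_from_P
-- ===== SOURCE A (Python) =====
-- import os, sys, math, time, importlib, yaml, warnings
-- from typing import Dict, Any, List, Tuple, Optional
--
-- def choose_grid_from_P(P: int) -> Tuple[int,int]:
--     """
--     Fallback when dataset doesn't give H/W: most-square (n1,n2) factorization with n1*n2=P.
--     """
--     best = (1, P)
--     best_diff = P - 1
--     r = int(math.sqrt(P))
--     for n1 in range(1, r+1):
--         if P % n1 == 0:
--             n2 = P // n1
--             if abs(n2 - n1) < best_diff: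
--                 best = (n1, n2)
--                 best_diff = abs(n2 - n1)
--     return best  # (rows, cols)
-- ===== SOURCE B (Python) =====
-- import math
--
-- def choose_grid_from_P(P: int):
--     """
--     Most-square (n1, n2) factorization with n1*n2 = P.
--     Scan downward from int(sqrt(P)): the first divisor found is the largest
--     divisor <= sqrt(P), which gives the most-square pair directly.
--     """
--     r = int(math.sqrt(P))
--     for n1 in range(r, 0, -1):
--         if P % n1 == 0:
--             return (n1, P // n1)
--     return (1, P)
-- ===== Notes on version B (the rewrite author's own statement) =====
-- stated objective: simpler
-- what changed: B replaces A's full ascending sweep with a running best/best_diff accumulator by a downward scan from int(sqrt(P)) that returns at the first divisor found (the largest divisor below the square root is provably the most-square factor), falling back to the trivial factorization when the scan is empty.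
import Mathlib
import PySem

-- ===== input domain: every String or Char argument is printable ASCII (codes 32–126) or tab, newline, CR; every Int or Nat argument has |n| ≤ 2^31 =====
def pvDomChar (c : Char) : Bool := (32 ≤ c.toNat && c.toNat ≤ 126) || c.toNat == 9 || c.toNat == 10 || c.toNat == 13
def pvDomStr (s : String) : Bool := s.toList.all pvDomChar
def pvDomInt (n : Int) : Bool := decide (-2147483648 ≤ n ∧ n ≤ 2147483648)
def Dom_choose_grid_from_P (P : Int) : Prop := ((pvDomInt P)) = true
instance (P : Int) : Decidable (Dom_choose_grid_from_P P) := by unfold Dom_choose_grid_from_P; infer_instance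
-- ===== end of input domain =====

-- B replaces A's ascending sweep with a best/best_diff accumulator by a downward scan from
-- int(sqrt(P)) returning at the first divisor (objective: simpler).
-- Within Dom (P ≤ 2^31) int(math.sqrt(P)) = isqrt(P), modelled by Nat.sqrt on P.toNat.

-- ===== PORT A =====
def choose_grid_from_P (P : Int) : Int × Int :=
  let r : Int := ((Int.toNat P).sqrt : Nat)
  let st := (PySem.List.pyRange 1 (r + 1) 1).foldl
    (fun (s : (Int × Int) × Int) n1 =>
      if PySem.Int.mod P n1 = 0 then
        let n2 := PySem.Int.floordiv P n1
        if |n2 - n1| < s.2 then ((n1, n2), |n2 - n1|) else s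
      else s)
    ((1, P), P - 1)
  st.1

-- ===== PORT B =====
-- descending loop `for n1 in range(r, 0, -1): if P % n1 == 0: return (n1, P // n1)`
def pvAltLoop (P : Int) : Nat → Option (Int × Int)
  | 0 => none
  | k + 1 =>
      if PySem.Int.mod P ((k : Int) + 1) = 0 then
        some (((k : Int) + 1), PySem.Int.floordiv P ((k : Int) + 1))
      else pvAltLoop P k

def choose_grid_from_P_alt (P : Int) : Int × Int :=
  match pvAltLoop P (Int.toNat P).sqrt with
  | some pr => pr
  | none => (1, P)

-- ===== PRECONDITION & SPEC =====
-- Pre_ excludes P < 0, on which both A and B raise ValueError in math.sqrt.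
def Pre_choose_grid_from_P (P : Int) : Prop := 0 ≤ P
instance (P : Int) : Decidable (Pre_choose_grid_from_P P) := by unfold Pre_choose_grid_from_P; infer_instance
def pvWitness_choose_grid_from_P : Int := 12

def Spec_choose_grid_from_P (P : Int) (out : Int × Int) : Prop := out = choose_grid_from_P_alt P
instance (P : Int) (out : Int × Int) : Decidable (Spec_choose_grid_from_P P out) := by unfold Spec_choose_grid_from_P; infer_instance

-- ===== CLAIM (what is proved, stated in full; the proofs are below) =====
def Claim_equal_choose_grid_from_P : Prop := ∀ (P : Int), Dom_choose_grid_from_P P → Pre_choose_grid_from_P P → Spec_choose_grid_from_P P (choose_grid_from_P P)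

-- ===== LEMMAS AND PROOFS =====

-- A's loop step
def pvStep (P : Int) (s : (Int × Int) × Int) (n1 : Int) : (Int × Int) × Int :=
  if PySem.Int.mod P n1 = 0 then
    let n2 := PySem.Int.floordiv P n1
    if |n2 - n1| < s.2 then ((n1, n2), |n2 - n1|) else s
  else s

lemma pvAltLoop_some {P : Int} {k : Nat} {m n : Int} (h : pvAltLoop P k = some (m, n)) :
    1 ≤ m ∧ m ≤ (k : Int) ∧ PySem.Int.mod P m = 0 ∧ n = PySem.Int.floordiv P m := by
  induction k with
  | zero => simp [pvAltLoop] at h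
  | succ k ih =>
      unfold pvAltLoop at h
      split at h
      · rename_i hd
        rcases h with ⟨rfl, rfl⟩  -- some injective
        refine ⟨by push_cast; omega, by push_cast; omega, by simpa using hd, rfl⟩
      · obtain ⟨h1, h2, h3, h4⟩ := ih h
        exact ⟨h1, by push_cast; omega, h3, h4⟩

lemma pvAltLoop_isSome (P : Int) (k : Nat) (hk : 1 ≤ k) : (pvAltLoop P k).isSome := by
  induction k with
  | zero => omega
  | succ k ih =>
      unfold pvAltLoop
      split
      · simp
      · rename_i hd
        cases k with
        | zero =>
            exfalso; apply hd
            simp [PySem.Int.mod]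
        | succ k => exact ih (by omega)

-- divisor ≤ sqrt gives a cofactor ≥ the divisor
lemma pv_div_ge {P d : Int} (hP : 0 ≤ P) (hd : 1 ≤ d) (hdd : d * d ≤ P) :
    d ≤ PySem.Int.floordiv P d := by
  rw [PySem.Int.le_floordiv_iff_mul_le (by omega)]
  exact hdd

-- floordiv antitone in the (positive) divisor, for P ≥ 0
lemma pv_floordiv_anti {P m d : Int} (hP : 0 ≤ P) (hm : 1 ≤ m) (hmd : m ≤ d) :
    PySem.Int.floordiv P d ≤ PySem.Int.floordiv P m := by
  have hd : (1:Int) ≤ d := le_trans hm hmd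
  rw [PySem.Int.le_floordiv_iff_mul_le (by omega)]
  have h1 : PySem.Int.floordiv P d * d ≤ P := by
    have := PySem.Int.floordiv_mul_add_mod P d
    have hmod := PySem.Int.mod_nonneg P (b := d) (by omega)
    omega
  have h0 : 0 ≤ PySem.Int.floordiv P d := by
    rw [PySem.Int.le_floordiv_iff_mul_le (by omega)]; omega
  nlinarith

-- the invariant: A's fold state after n1 = 1..k equals B's candidate (with its diff)
lemma pv_inv (P : Int) (hP : 0 ≤ P) (k : Nat) (hk : (k : Int) * (k : Int) ≤ P) :
    (PySem.List.pyRange 1 ((k : Int) + 1) 1).foldl (pvStep P) ((1, P), P - 1) =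
      match pvAltLoop P k with
      | some (m, n) => ((m, n), n - m)
      | none => ((1, P), P - 1) := by
  induction k with
  | zero =>
      simp [pvAltLoop, PySem.List.pyRange]
  | succ k ih =>
      have hk' : (k : Int) * (k : Int) ≤ P := by push_cast at hk ⊢; nlinarith
      have hrec := ih hk'
      have hpe : PySem.List.pyRange 1 (((k+1 : Nat) : Int) + 1) 1
          = PySem.List.pyRange 1 ((k : Int) + 1) 1 ++ [(k : Int) + 1] := by
        have h := PySem.List.pyRange_one_succ_right (a := 1) (b := (k : Int) + 1) (by omega)
        push_cast
        push_cast at h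
        rw [add_comm] at h ⊢
        convert h using 2 <;> ring
      rw [hpe, List.foldl_append, hrec, List.foldl_cons, List.foldl_nil]
      conv_rhs => rw [pvAltLoop]
      have hd1 : (1 : Int) ≤ (k : Int) + 1 := by push_cast; omega
      have hdd : ((k : Int) + 1) * ((k : Int) + 1) ≤ P := by push_cast at hk ⊢; nlinarith
      by_cases hdiv : PySem.Int.mod P ((k : Int) + 1) = 0
      · -- k+1 divides P: A updates (unless k+1 = 1), B's pvAltLoop takes it
        rw [if_pos hdiv]
        have hge : (k : Int) + 1 ≤ PySem.Int.floordiv P ((k : Int) + 1) :=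
          pv_div_ge hP hd1 hdd
        cases k with
        | zero =>
            -- n1 = 1: diff = P - 1, strict < fails; both sides are ((1,P), P-1)
            have hfl : PySem.Int.floordiv P 1 = P := by
              simpa using PySem.Int.floordiv_eq_ediv_of_pos (a := P) (b := 1) (by omega)
            cases h0 : pvAltLoop P 0 with
            | some pr => simp [pvAltLoop] at h0
            | none =>
                unfold pvStep
                rw [if_pos (by simpa using hdiv)]
                have hno : ¬ (|PySem.Int.floordiv P ((0:Nat) + 1 : Int) - ((0:Nat) + 1 : Int)| < (((1:Int), P), P - 1).2) := by
                  push_cast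
                  rw [hfl]
                  exact not_lt.mpr (le_abs_self _)
                rw [if_neg (by simpa using hno)]
                push_cast
                rw [hfl]
        | succ k =>
            -- n1 = k+2 ≥ 2: a previous divisor exists and the new diff is strictly smaller
            cases hprev : pvAltLoop P (k+1) with
            | none =>
                exfalso
                have h1 := pvAltLoop_isSome P (k+1) (by omega)
                rw [hprev] at h1; simp at h1
            | some pr =>
                obtain ⟨m, n⟩ := pr
                obtain ⟨hm1, hmk, hmdvd, hn⟩ := pvAltLoop_some hprev
                have hanti : PySem.Int.floordiv P (((k+1 : Nat) : Int) + 1)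
                    ≤ PySem.Int.floordiv P m := pv_floordiv_anti hP hm1 (by push_cast at hmk ⊢; omega)
                have hlt : |PySem.Int.floordiv P (((k+1 : Nat) : Int) + 1) - (((k+1 : Nat) : Int) + 1)| < n - m := by
                  rw [abs_of_nonneg (by omega), hn]
                  omega
                unfold pvStep
                rw [if_pos hdiv, if_pos (by simpa using hlt), abs_of_nonneg (by omega)]
      · -- k+1 does not divide P: both sides are unchanged
        rw [if_neg hdiv]
        unfold pvStep
        rw [if_neg hdiv]

-- ===== VERDICT (by name: the statement is the Claim_ definition above) =====
theorem choose_grid_from_P_spec : Claim_equal_choose_grid_from_P := by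
  intro P _ hP
  unfold Spec_choose_grid_from_P choose_grid_from_P choose_grid_from_P_alt
  have hsq : ((Int.toNat P).sqrt : Int) * ((Int.toNat P).sqrt : Int) ≤ P := by
    have h1 : ((((Int.toNat P).sqrt * (Int.toNat P).sqrt : Nat)) : Int) ≤ ((Int.toNat P : Nat) : Int) :=
      Int.ofNat_le.mpr (Nat.sqrt_le (Int.toNat P))
    push_cast at h1
    rw [Int.toNat_of_nonneg hP] at h1
    exact h1
  have h := pv_inv P hP (Int.toNat P).sqrt hsq
  show (List.foldl (pvStep P) ((1, P), P - 1) (PySem.List.pyRange 1 (((Int.toNat P).sqrt : Int) + 1) 1)).1 = _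
  rw [h]
  cases hloop : pvAltLoop P (Int.toNat P).sqrt with
  | none => rfl
  | some pr => obtain ⟨m, n⟩ := pr; rfl
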